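-- pv_equiv track=rewrite | github.com/Lenoom/Codigos | 2048.py | mov_ws
-- ===== SOURCE A (Python) =====
-- def mov_ws(a,b,c,p,w,jogo,movetrue):
--     movetrue
--     w = w
--     z = p
--     b1 = b
--     if c == 1:
--         b1 += -1
--
--     for x in range(a,b,c):
--         for w in range(3):
--             for y in range(a,b1,c):
--                 z = y + c
--                 if jogo[y][x] == 0 and jogo[z][x] != 0 and -1<z<4:
--                     jogo[y][x] = jogo[z][x]
--                     jogo[z][x] = 0
--                     movetrue = True
--     return movetrue
-- ===== SOURCE B (Python) =====
-- def mov_ws(a, b, c, p, w, jogo, movetrue):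
--     idx = list(range(a, b, c))
--     for x in idx:
--         vals = [jogo[y][x] for y in idx]
--         tiles = [v for v in vals if v != 0]
--         packed = tiles + [0] * (len(vals) - len(tiles))
--         if packed != vals:
--             movetrue = True
--             for y, v in zip(idx, packed):
--                 jogo[y][x] = v
--     return movetrue
-- ===== Notes on version B (the rewrite author's own statement) =====
-- stated objective: simpler
-- what changed: A slides tiles by three in-place bubble passes over adjacent cells, flagging every swap; B rebuilds each traversed line in one pass (collect nonzero values, pad with zeros, write back) and flags a change by comparing the rebuilt line with the original. Pre_ restricts to the function's natural 2048 domain: empty traversals always admitted; …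
-- outside the precondition, e.g. on mov_ws(0, 2, 2, 0, 0, [[0], [9], [5]], False): A returns True, B returns False
import Mathlib
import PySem

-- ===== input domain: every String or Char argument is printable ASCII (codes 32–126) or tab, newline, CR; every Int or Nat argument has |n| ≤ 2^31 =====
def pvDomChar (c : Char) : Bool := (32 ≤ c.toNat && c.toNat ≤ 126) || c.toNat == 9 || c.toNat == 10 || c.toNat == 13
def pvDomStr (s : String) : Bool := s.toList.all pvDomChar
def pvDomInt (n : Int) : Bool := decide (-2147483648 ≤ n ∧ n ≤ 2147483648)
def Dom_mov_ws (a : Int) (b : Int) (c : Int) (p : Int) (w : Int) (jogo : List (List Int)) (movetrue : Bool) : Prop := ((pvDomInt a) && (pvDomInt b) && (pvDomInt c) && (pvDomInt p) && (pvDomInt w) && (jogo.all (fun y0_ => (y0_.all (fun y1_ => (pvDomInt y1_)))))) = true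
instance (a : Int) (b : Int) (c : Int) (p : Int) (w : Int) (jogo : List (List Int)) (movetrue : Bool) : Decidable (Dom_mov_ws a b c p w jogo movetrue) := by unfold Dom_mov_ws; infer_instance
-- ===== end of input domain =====

-- A slides tiles with three in-place bubble passes and flags any swap; B rebuilds each traversed
-- line in one pass (collect nonzeros, pad with zeros, write back) and flags by comparing lines —
-- simpler. Both Pythons mutate jogo in place; the equivalence proved here is about the RETURN
-- value only.


-- ===== PORT A =====
-- body of the innermost y-loop: z = y + c; conditional swap jogo[y][x] <-> jogo[z][x] and flag
def mov_ws_step (c x : Int) (st : List (List Int) × Bool) (y : Int) : List (List Int) × Bool :=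
  let z := y + c
  match (PySem.List.pyGet? st.1 y).bind (fun r => PySem.List.pyGet? r x) with
  | none => st          -- IndexError (outside Pre_)
  | some vy =>
    if vy = 0 then
      match (PySem.List.pyGet? st.1 z).bind (fun r => PySem.List.pyGet? r x) with
      | none => st      -- IndexError (outside Pre_)
      | some vz =>
        if vz ≠ 0 ∧ -1 < z ∧ z < 4 then
          -- jogo[y][x] = jogo[z][x]; jogo[z][x] = 0
          let g1 := PySem.List.pySetD st.1 y (PySem.List.pySetD (PySem.List.pyGetD st.1 y []) x vz)
          let g2 := PySem.List.pySetD g1 z (PySem.List.pySetD (PySem.List.pyGetD g1 z []) x 0)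
          (g2, true)
        else st
    else st

-- for y in range(a,b1,c): …
def mov_ws_passY (a b1 c x : Int) (st : List (List Int) × Bool) : List (List Int) × Bool :=
  (PySem.List.pyRange a b1 c).foldl (mov_ws_step c x) st

-- for w in range(3): …
def mov_ws_passW (a b1 c x : Int) (st : List (List Int) × Bool) : List (List Int) × Bool :=
  (PySem.List.pyRange 0 3 1).foldl (fun s _w => mov_ws_passY a b1 c x s) st

def mov_ws (a : Int) (b : Int) (c : Int) (p : Int) (w : Int) (jogo : List (List Int)) (movetrue : Bool) : Bool :=
  let b1 := if c = 1 then b + (-1) else b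
  ((PySem.List.pyRange a b c).foldl (fun st x => mov_ws_passW a b1 c x st) (jogo, movetrue)).2

-- ===== PORT B =====
-- jogo[y][x] (total form of the read; Pre_ keeps every used index in range)
def readg (g : List (List Int)) (x y : Int) : Int :=
  PySem.List.pyGetD (PySem.List.pyGetD g y []) x 0

-- vals = [jogo[y][x] for y in idx]
def mov_ws_alt_vals (idx : List Int) (g : List (List Int)) (x : Int) : List Int :=
  idx.map (readg g x)

-- tiles = [v for v in vals if v != 0]; packed = tiles + [0] * (len(vals) - len(tiles))
def mov_ws_alt_packed (vals : List Int) : List Int :=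
  let tiles := vals.filter (fun v => decide (v ≠ 0))
  tiles ++ List.replicate (vals.length - tiles.length) 0

-- one iteration of the x-loop: compare, flag, write back
def mov_ws_alt_step (idx : List Int) (x : Int) (st : List (List Int) × Bool) : List (List Int) × Bool :=
  let vals := mov_ws_alt_vals idx st.1 x
  let packed := mov_ws_alt_packed vals
  if packed ≠ vals then
    ((idx.zip packed).foldl
        (fun g yv => PySem.List.pySetD g yv.1 (PySem.List.pySetD (PySem.List.pyGetD g yv.1 []) x yv.2))
        st.1,
      true)
  else st

def mov_ws_alt (a : Int) (b : Int) (c : Int) (p : Int) (w : Int) (jogo : List (List Int)) (movetrue : Bool) : Bool :=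
  let idx := PySem.List.pyRange a b c
  (idx.foldl (fun st x => mov_ws_alt_step idx x st) (jogo, movetrue)).2

-- ===== PRECONDITION & SPEC =====
-- size of range(a, b, c) (same formula as the range length), its last element, and the
-- smallest/largest visited index — plain arithmetic on the inputs
def preN (a b c : Int) : Nat :=
  if 0 < c then (if a < b then ((b - a + c - 1) / c).toNat else 0)
  else (if b < a then ((a - b + -c - 1) / -c).toNat else 0)
def preLast (a b c : Int) : Int := a + c * ((preN a b c : Int) - 1)
def preLo (a b c : Int) : Int := min a (preLast a b c)
def preHi (a b c : Int) : Int := max a (preLast a b c)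

-- Pre_ restricts to the function's natural 2048 domain: empty traversals are always admitted;
-- a nonempty traversal must keep every visited row/column index readable on the board, all
-- visited indices after the first inside the 0..3 window A's hard-coded '-1<z<4' guard serves,
-- and (for a step other than 1) the one extra cell A probes beyond the range readable but
-- outside that window. Outside this, A's value (or its IndexError / ValueError on c = 0) is an
-- artefact of the 4x4 hard-coding, and excluded inputs on which A still returns are cited in
-- claim.json.
def Pre_mov_ws (a : Int) (b : Int) (c : Int) (p : Int) (w : Int) (jogo : List (List Int)) (movetrue : Bool) : Prop :=
  c ≠ 0 ∧
  (preN a b c = 0 ∨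
    (-(jogo.length : Int) ≤ preLo a b c ∧ preHi a b c < (jogo.length : Int) ∧
     (∀ row ∈ jogo, -(row.length : Int) ≤ preLo a b c ∧ preHi a b c < (row.length : Int)) ∧
     (preN a b c = 1 ∨ (0 ≤ min (a + c) (preLast a b c) ∧ max (a + c) (preLast a b c) < 4)) ∧
     (c = 1 ∨ (¬(-1 < preLast a b c + c ∧ preLast a b c + c < 4) ∧
               -(jogo.length : Int) ≤ preLast a b c + c ∧ preLast a b c + c < (jogo.length : Int)))))
instance (a : Int) (b : Int) (c : Int) (p : Int) (w : Int) (jogo : List (List Int)) (movetrue : Bool) : Decidable (Pre_mov_ws a b c p w jogo movetrue) := by unfold Pre_mov_ws; infer_instance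

def pvWitness_mov_ws : Int × Int × Int × Int × Int × List (List Int) × Bool :=
  (0, 4, 1, 0, 0, [[0, 2, 0, 2], [2, 0, 2, 0], [0, 0, 0, 0], [2, 2, 2, 2]], false)

def Spec_mov_ws (a : Int) (b : Int) (c : Int) (p : Int) (w : Int) (jogo : List (List Int)) (movetrue : Bool) (out : Bool) : Prop := out = mov_ws_alt a b c p w jogo movetrue
instance (a : Int) (b : Int) (c : Int) (p : Int) (w : Int) (jogo : List (List Int)) (movetrue : Bool) (out : Bool) : Decidable (Spec_mov_ws a b c p w jogo movetrue out) := by unfold Spec_mov_ws; infer_instance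

-- ===== CLAIM (what is proved, stated in full; the proofs are below) =====
def Claim_equal_mov_ws : Prop := ∀ (a : Int) (b : Int) (c : Int) (p : Int) (w : Int) (jogo : List (List Int)) (movetrue : Bool), Dom_mov_ws a b c p w jogo movetrue → Pre_mov_ws a b c p w jogo movetrue → Spec_mov_ws a b c p w jogo movetrue (mov_ws a b c p w jogo movetrue)

-- ===== LEMMAS AND PROOFS =====

-- ---- A-side: the returned flag is 'old flag OR some adjacent (0, nonzero) hit on the ORIGINAL grid'

-- the hit predicate of A's swap condition, on a fixed grid
def mov_ws_hit (jogo : List (List Int)) (c x y : Int) : Bool :=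
  match (PySem.List.pyGet? jogo y).bind (fun r => PySem.List.pyGet? r x),
        (PySem.List.pyGet? jogo (y + c)).bind (fun r => PySem.List.pyGet? r x) with
  | some vy, some vz => decide (vy = 0 ∧ vz ≠ 0 ∧ -1 < y + c ∧ y + c < 4)
  | _, _ => false

theorem mov_ws_step_snd (c x : Int) (st : List (List Int) × Bool) (y : Int) :
    (mov_ws_step c x st y).2 = (st.2 || mov_ws_hit st.1 c x y) := by
  unfold mov_ws_step mov_ws_hit
  cases h1 : (PySem.List.pyGet? st.1 y).bind (fun r => PySem.List.pyGet? r x) with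
  | none => simp
  | some vy =>
    cases h2 : (PySem.List.pyGet? st.1 (y + c)).bind (fun r => PySem.List.pyGet? r x) with
    | none => by_cases hy : vy = 0 <;> simp [hy, h2]
    | some vz =>
      by_cases hy : vy = 0 <;> by_cases hc : vz ≠ 0 ∧ -1 < y + c ∧ y + c < 4 <;>
        simp [hy, hc, h2]

theorem mov_ws_step_id (c x : Int) (st : List (List Int) × Bool) (y : Int)
    (h : mov_ws_hit st.1 c x y = false) : mov_ws_step c x st y = st := by
  unfold mov_ws_step
  unfold mov_ws_hit at h
  cases h1 : (PySem.List.pyGet? st.1 y).bind (fun r => PySem.List.pyGet? r x) with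
  | none => simp
  | some vy =>
    cases h2 : (PySem.List.pyGet? st.1 (y + c)).bind (fun r => PySem.List.pyGet? r x) with
    | none => by_cases hy : vy = 0 <;> simp [hy, h2]
    | some vz =>
      rw [h1, h2] at h
      by_cases hy : vy = 0 <;> by_cases hc : vz ≠ 0 ∧ -1 < y + c ∧ y + c < 4 <;>
        simp [hy, hc, h2] at h ⊢

theorem mov_ws_foldY_mono (c x : Int) (L : List Int) :
    ∀ st : List (List Int) × Bool, st.2 = true → (L.foldl (mov_ws_step c x) st).2 = true := by
  induction L with
  | nil => intro st h; simpa using h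
  | cons y L ih =>
      intro st h
      simp only [List.foldl_cons]
      exact ih _ (by rw [mov_ws_step_snd, h, Bool.true_or])

theorem mov_ws_foldY_snd (c x : Int) (L : List Int) :
    ∀ st : List (List Int) × Bool,
      (L.foldl (mov_ws_step c x) st).2 = (st.2 || L.any (fun y => mov_ws_hit st.1 c x y)) := by
  induction L with
  | nil => intro st; simp
  | cons y L ih =>
      intro st
      simp only [List.foldl_cons, List.any_cons]
      by_cases h : mov_ws_hit st.1 c x y = false
      · rw [mov_ws_step_id c x st y h, ih st, h]; simp
      · rw [Bool.not_eq_false] at h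
        rw [mov_ws_foldY_mono c x L _ (by rw [mov_ws_step_snd, h, Bool.or_true]), h]
        simp

theorem mov_ws_foldY_id (c x : Int) (L : List Int) :
    ∀ st : List (List Int) × Bool, L.any (fun y => mov_ws_hit st.1 c x y) = false →
      L.foldl (mov_ws_step c x) st = st := by
  induction L with
  | nil => intro st _; rfl
  | cons y L ih =>
      intro st h
      simp only [List.any_cons, Bool.or_eq_false_iff] at h
      simp only [List.foldl_cons, mov_ws_step_id c x st y h.1]
      exact ih st h.2

theorem mov_ws_passW_snd (a b1 c x : Int) (st : List (List Int) × Bool) :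
    (mov_ws_passW a b1 c x st).2
      = (st.2 || (PySem.List.pyRange a b1 c).any (fun y => mov_ws_hit st.1 c x y)) := by
  have h3 : PySem.List.pyRange 0 3 1 = [0, 1, 2] := by decide
  unfold mov_ws_passW mov_ws_passY
  rw [h3]
  by_cases h : (PySem.List.pyRange a b1 c).any (fun y => mov_ws_hit st.1 c x y) = false
  · simp only [List.foldl_cons, List.foldl_nil, mov_ws_foldY_id c x _ st h, h]
    simp
  · rw [Bool.not_eq_false] at h
    simp only [List.foldl_cons, List.foldl_nil]
    rw [mov_ws_foldY_mono c x _ _ (mov_ws_foldY_mono c x _ _ (by rw [mov_ws_foldY_snd, h]; simp)), h]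
    simp

theorem mov_ws_passW_id (a b1 c x : Int) (st : List (List Int) × Bool)
    (h : (PySem.List.pyRange a b1 c).any (fun y => mov_ws_hit st.1 c x y) = false) :
    mov_ws_passW a b1 c x st = st := by
  have h3 : PySem.List.pyRange 0 3 1 = [0, 1, 2] := by decide
  unfold mov_ws_passW mov_ws_passY
  rw [h3]
  simp only [List.foldl_cons, List.foldl_nil,
    mov_ws_foldY_id c x _ st h]

theorem mov_ws_foldX_mono (a b1 c : Int) (I : List Int) :
    ∀ st : List (List Int) × Bool, st.2 = true →
      (I.foldl (fun st x => mov_ws_passW a b1 c x st) st).2 = true := by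
  induction I with
  | nil => intro st h; simpa using h
  | cons x I ih =>
      intro st h
      simp only [List.foldl_cons]
      exact ih _ (by rw [mov_ws_passW_snd, h, Bool.true_or])

theorem mov_ws_foldX_snd (a b1 c : Int) (I : List Int) :
    ∀ st : List (List Int) × Bool,
      (I.foldl (fun st x => mov_ws_passW a b1 c x st) st).2
        = (st.2 || I.any (fun x => (PySem.List.pyRange a b1 c).any (fun y => mov_ws_hit st.1 c x y))) := by
  induction I with
  | nil => intro st; simp
  | cons x I ih =>
      intro st
      simp only [List.foldl_cons, List.any_cons]
      by_cases h : (PySem.List.pyRange a b1 c).any (fun y => mov_ws_hit st.1 c x y) = false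
      · rw [mov_ws_passW_id a b1 c x st h, ih st, h]; simp
      · rw [Bool.not_eq_false] at h
        rw [mov_ws_foldX_mono a b1 c I _ (by rw [mov_ws_passW_snd, h, Bool.or_true]), h]
        simp

-- ---- B-side: the returned flag is 'old flag OR some traversed line changes on the ORIGINAL grid'

def bChanged (idx : List Int) (g : List (List Int)) (x : Int) : Bool :=
  decide (mov_ws_alt_packed (mov_ws_alt_vals idx g x) ≠ mov_ws_alt_vals idx g x)

theorem mov_ws_alt_step_snd (idx : List Int) (x : Int) (st : List (List Int) × Bool) :
    (mov_ws_alt_step idx x st).2 = (st.2 || bChanged idx st.1 x) := by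
  unfold mov_ws_alt_step bChanged
  by_cases h : mov_ws_alt_packed (mov_ws_alt_vals idx st.1 x) ≠ mov_ws_alt_vals idx st.1 x <;>
    simp [h]

theorem mov_ws_alt_step_id (idx : List Int) (x : Int) (st : List (List Int) × Bool)
    (h : bChanged idx st.1 x = false) : mov_ws_alt_step idx x st = st := by
  unfold bChanged at h
  rw [decide_eq_false_iff_not, not_not] at h
  unfold mov_ws_alt_step
  simp [h]

theorem mov_ws_alt_fold_mono (idx : List Int) (I : List Int) :
    ∀ st : List (List Int) × Bool, st.2 = true →
      (I.foldl (fun st x => mov_ws_alt_step idx x st) st).2 = true := by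
  induction I with
  | nil => intro st h; simpa using h
  | cons x I ih =>
      intro st h
      simp only [List.foldl_cons]
      exact ih _ (by rw [mov_ws_alt_step_snd, h, Bool.true_or])

theorem mov_ws_alt_fold_snd (idx : List Int) (I : List Int) :
    ∀ st : List (List Int) × Bool,
      (I.foldl (fun st x => mov_ws_alt_step idx x st) st).2
        = (st.2 || I.any (fun x => bChanged idx st.1 x)) := by
  induction I with
  | nil => intro st; simp
  | cons x I ih =>
      intro st
      simp only [List.foldl_cons, List.any_cons]
      by_cases h : bChanged idx st.1 x = false
      · rw [mov_ws_alt_step_id idx x st h, ih st, h]; simp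
      · rw [Bool.not_eq_false] at h
        rw [mov_ws_alt_fold_mono idx I _ (by rw [mov_ws_alt_step_snd, h, Bool.or_true]), h]
        simp

-- ---- 'line changed by compaction' iff 'some adjacent (0, nonzero) pair'

def adjHit : List Int → Bool
  | v1 :: v2 :: t => (decide (v1 = 0) && decide (v2 ≠ 0)) || adjHit (v2 :: t)
  | _ => false

theorem adjHit_cons_of_ne (v : Int) (t : List Int) (hv : v ≠ 0) :
    adjHit (v :: t) = adjHit t := by
  cases t with
  | nil => simp [adjHit]
  | cons v2 t2 => simp [adjHit, hv]

theorem adjHit_all_zero (l : List Int) (h : ∀ v ∈ l, v = 0) : adjHit l = false := by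
  induction l with
  | nil => rfl
  | cons v t ih =>
      cases t with
      | nil => rfl
      | cons v2 t2 =>
          have h2 : v2 = 0 := h v2 (by simp)
          subst h2
          simp only [adjHit]
          rw [ih (fun u hu => h u (List.mem_cons_of_mem _ hu))]
          simp

theorem adjHit_zero_cons (t : List Int) (h : ∃ v ∈ t, v ≠ 0) : adjHit (0 :: t) = true := by
  induction t with
  | nil => simp at h
  | cons v2 t2 ih =>
      by_cases h2 : v2 = 0
      · subst h2
        have ht2 : ∃ v ∈ t2, v ≠ 0 := by
          obtain ⟨u, hu, hu0⟩ := h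
          rcases List.mem_cons.mp hu with rfl | hm
          · exact absurd rfl hu0
          · exact ⟨u, hm, hu0⟩
        have hrec := ih ht2
        simp only [adjHit]
        simp [hrec]
      · simp [adjHit, h2]

theorem packed_all_zero (l : List Int) (h : ∀ v ∈ l, v = 0) : mov_ws_alt_packed l = l := by
  unfold mov_ws_alt_packed
  have hf : l.filter (fun v => decide (v ≠ 0)) = [] := by
    rw [List.filter_eq_nil_iff]
    intro v hv
    simp [h v hv]
  rw [hf]
  simp only [List.nil_append, List.length_nil, Nat.sub_zero]
  exact (List.eq_replicate_iff.mpr ⟨rfl, fun v hv => h v hv⟩).symm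

theorem packed_ne_zero_cons (t : List Int) (h : ∃ v ∈ t, v ≠ 0) :
    mov_ws_alt_packed ((0 : Int) :: t) ≠ (0 : Int) :: t := by
  obtain ⟨u, hu, hu0⟩ := h
  have humem : u ∈ t.filter (fun v => decide (v ≠ 0)) :=
    List.mem_filter.mpr ⟨hu, by simpa using hu0⟩
  have hfc : ((0 : Int) :: t).filter (fun v => decide (v ≠ 0)) = t.filter (fun v => decide (v ≠ 0)) := by
    simp [List.filter_cons]
  intro heq
  unfold mov_ws_alt_packed at heq
  rw [hfc] at heq
  cases hf : t.filter (fun v => decide (v ≠ 0)) with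
  | nil => rw [hf] at humem; simp at humem
  | cons fh ft =>
      rw [hf] at heq
      have hfh : fh ≠ 0 := by
        have hm : fh ∈ t.filter (fun v => decide (v ≠ 0)) := by rw [hf]; exact List.mem_cons_self
        simpa using List.of_mem_filter hm
      exact hfh (by simpa using congrArg List.head? heq)

theorem packed_ne_decide (l : List Int) :
    decide (mov_ws_alt_packed l ≠ l) = adjHit l := by
  induction l with
  | nil =>
      have : mov_ws_alt_packed ([] : List Int) = [] := rfl
      simp [this, adjHit]
  | cons v t ih =>
      by_cases hv : v = 0
      · subst hv
        by_cases hz : ∀ u ∈ t, u = 0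
        · have h1 : mov_ws_alt_packed ((0 : Int) :: t) = (0 : Int) :: t :=
            packed_all_zero _ (by intro u hu; rcases List.mem_cons.mp hu with h | h; exact h; exact hz u h)
          have h2 : adjHit ((0 : Int) :: t) = false :=
            adjHit_all_zero _ (by intro u hu; rcases List.mem_cons.mp hu with h | h; exact h; exact hz u h)
          simp [h1, h2]
        · push_neg at hz
          have h1 := packed_ne_zero_cons t hz
          have h2 := adjHit_zero_cons t hz
          simp [h1, h2]
      · have hpk : mov_ws_alt_packed (v :: t) = v :: mov_ws_alt_packed t := by
          unfold mov_ws_alt_packed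
          rw [List.filter_cons, if_pos (by simpa using hv)]
          simp [Nat.succ_sub_succ]
        rw [hpk, adjHit_cons_of_ne v t hv, ← ih, decide_eq_decide]
        constructor
        · intro hne heq
          exact hne (by rw [heq])
        · intro hne heq
          exact hne (List.tail_eq_of_cons_eq heq)

theorem bChanged_eq_adjHit (idx : List Int) (g : List (List Int)) (x : Int) :
    bChanged idx g x = adjHit (idx.map (readg g x)) := by
  unfold bChanged mov_ws_alt_vals
  exact packed_ne_decide _

-- ---- arithmetic-progression view of range(a, b, c)

def rmap (a c : Int) (n : Nat) : List Int := (List.range n).map (fun k : Nat => a + c * (k : Int))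

theorem rmap_succ (a c : Int) (n : Nat) : rmap a c (n + 1) = a :: rmap (a + c) c n := by
  unfold rmap
  rw [List.range_succ_eq_map]
  simp only [List.map_cons, List.map_map]
  congr 1
  · simp
  · apply List.map_congr_left
    intro k _
    simp only [Function.comp]
    push_cast
    ring

theorem rmap_one (a c : Int) : rmap a c 1 = [a] := by
  simp [rmap]

theorem rmap_tail (a c : Int) (n : Nat) : (rmap a c (n + 1)).tail = rmap (a + c) c n := by
  rw [rmap_succ]
  rfl

theorem rmap_getLast? (a c : Int) (n : Nat) :
    (rmap a c (n + 1)).getLast? = some (a + c * (n : Int)) := by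
  induction n generalizing a with
  | zero => simp [rmap_one]
  | succ m ih =>
      rw [rmap_succ, rmap_succ, List.getLast?_cons_cons, ← rmap_succ, ih]
      congr 1
      push_cast
      ring

theorem rmap_mem_bounds (a c : Int) (n : Nat) (y : Int) (hy : y ∈ rmap a c n) :
    min a (a + c * ((n : Int) - 1)) ≤ y ∧ y ≤ max a (a + c * ((n : Int) - 1)) := by
  unfold rmap at hy
  obtain ⟨k, hk, rfl⟩ := List.mem_map.mp hy
  have hkn : (k : Int) ≤ (n : Int) - 1 := by
    have := List.mem_range.mp hk
    push_cast
    omega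
  have hk0 : (0 : Int) ≤ (k : Int) := by positivity
  by_cases hc : 0 ≤ c
  · have h1 : c * 0 ≤ c * (k : Int) := mul_le_mul_of_nonneg_left hk0 hc
    have h2 : c * (k : Int) ≤ c * ((n : Int) - 1) := mul_le_mul_of_nonneg_left hkn hc
    constructor
    · exact le_trans (min_le_left _ _) (by omega)
    · exact le_trans (by omega) (le_max_right _ _)
  · have hc' : c ≤ 0 := by omega
    have h1 : c * (k : Int) ≤ c * 0 := mul_le_mul_of_nonpos_left hk0 hc'
    have h2 : c * ((n : Int) - 1) ≤ c * (k : Int) := mul_le_mul_of_nonpos_left hkn hc'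
    constructor
    · exact le_trans (min_le_right _ _) (by omega)
    · exact le_trans (by omega) (le_max_left _ _)

theorem pyRange_eq_rmap (a b c : Int) (hc : c ≠ 0) :
    PySem.List.pyRange a b c = rmap a c (preN a b c) := by
  unfold PySem.List.pyRange rmap preN
  rw [if_neg hc]

theorem dropLast_range (n : Nat) : (List.range n).dropLast = List.range (n - 1) := by
  cases n with
  | zero => rfl
  | succ m => rw [List.range_succ, List.dropLast_concat]; simp

theorem pyRange_one_dropLast (a b : Int) :
    PySem.List.pyRange a (b - 1) 1 = (PySem.List.pyRange a b 1).dropLast := by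
  rw [PySem.List.pyRange_one, PySem.List.pyRange_one, ← List.map_dropLast, dropLast_range]
  have h : (b - 1 - a).toNat = (b - a).toNat - 1 := by omega
  rw [h]

-- ---- the per-pair characterisation of A's hit under the Pre_ bounds

theorem read_some (jogo : List (List Int)) (x y : Int)
    (hy : -(jogo.length : Int) ≤ y ∧ y < (jogo.length : Int))
    (hx : ∀ row ∈ jogo, -(row.length : Int) ≤ x ∧ x < (row.length : Int)) :
    (PySem.List.pyGet? jogo y).bind (fun r => PySem.List.pyGet? r x) = some (readg jogo x y) := by
  have hyIR : PySem.Raise.InRange jogo.length y := ⟨hy.1, hy.2⟩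
  cases hg : PySem.List.pyGet? jogo y with
  | none => exact absurd hyIR ((PySem.List.pyGet?_eq_none_iff _ _).mp hg)
  | some row =>
      have hmem : row ∈ jogo := by
        have h := PySem.List.pyGetD_mem jogo ([] : List Int) hyIR
        unfold PySem.List.pyGetD at h
        rw [hg] at h
        simpa using h
      have hxIR : PySem.Raise.InRange row.length x := ⟨(hx row hmem).1, (hx row hmem).2⟩
      cases hgx : PySem.List.pyGet? row x with
      | none => exact absurd hxIR ((PySem.List.pyGet?_eq_none_iff _ _).mp hgx)
      | some v =>
          unfold readg PySem.List.pyGetD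
          rw [hg]
          simp [hgx]

theorem hit_of_pair (jogo : List (List Int)) (c x y : Int)
    (hy : -(jogo.length : Int) ≤ y ∧ y < (jogo.length : Int))
    (hz : -(jogo.length : Int) ≤ y + c ∧ y + c < (jogo.length : Int))
    (hx : ∀ row ∈ jogo, -(row.length : Int) ≤ x ∧ x < (row.length : Int))
    (hzw : 0 ≤ y + c ∧ y + c < 4) :
    mov_ws_hit jogo c x y
      = (decide (readg jogo x y = 0) && decide (readg jogo x (y + c) ≠ 0)) := by
  unfold mov_ws_hit
  rw [read_some jogo x y hy hx, read_some jogo x (y + c) hz hx]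
  have h1 : (-1 : Int) < y + c := by omega
  have h2 : y + c < 4 := hzw.2
  by_cases e1 : readg jogo x y = 0 <;> by_cases e2 : readg jogo x (y + c) ≠ 0 <;>
    simp [e1, e2, h1, h2]

theorem hit_false_of_guard (jogo : List (List Int)) (c x y : Int)
    (h : ¬(-1 < y + c ∧ y + c < 4)) : mov_ws_hit jogo c x y = false := by
  unfold mov_ws_hit
  cases (PySem.List.pyGet? jogo y).bind (fun r => PySem.List.pyGet? r x) with
  | none => rfl
  | some vy =>
    cases (PySem.List.pyGet? jogo (y + c)).bind (fun r => PySem.List.pyGet? r x) with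
    | none => rfl
    | some vz =>
        rw [decide_eq_false_iff_not]
        rintro ⟨_, _, hg1, hg2⟩
        exact h ⟨hg1, hg2⟩

-- ---- the bridging lemmas: A's adjacent-pair scan over a traversed line equals adjHit of its values

theorem any_hit_rmap (jogo : List (List Int)) (c x : Int)
    (hx : ∀ row ∈ jogo, -(row.length : Int) ≤ x ∧ x < (row.length : Int)) :
    ∀ (n : Nat) (a : Int),
      (∀ y ∈ rmap a c n, -(jogo.length : Int) ≤ y ∧ y < (jogo.length : Int)) →
      (∀ y ∈ (rmap a c n).tail, (0 : Int) ≤ y ∧ y < 4) →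
      (∀ l : Int, (rmap a c n).getLast? = some l → mov_ws_hit jogo c x l = false) →
      (rmap a c n).any (fun y => mov_ws_hit jogo c x y) = adjHit ((rmap a c n).map (readg jogo x)) := by
  intro n
  induction n with
  | zero => intro a _ _ _; rfl
  | succ m ih =>
      intro a hin hwin hlast
      cases m with
      | zero =>
          rw [rmap_one] at hlast ⊢
          have hl := hlast a (by simp)
          simp [adjHit, hl]
      | succ m' =>
          have hsp : rmap a c (m' + 1 + 1) = a :: rmap (a + c) c (m' + 1) := rmap_succ a c (m' + 1)
          have hsp2 : rmap (a + c) c (m' + 1) = (a + c) :: rmap (a + c + c) c m' := rmap_succ (a + c) c m'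
          have htail : (rmap a c (m' + 1 + 1)).tail = rmap (a + c) c (m' + 1) := rmap_tail a c (m' + 1)
          have hin' : ∀ y ∈ rmap (a + c) c (m' + 1), -(jogo.length : Int) ≤ y ∧ y < (jogo.length : Int) := by
            intro y hy
            exact hin y (by rw [hsp]; exact List.mem_cons_of_mem _ hy)
          have hwin' : ∀ y ∈ (rmap (a + c) c (m' + 1)).tail, (0 : Int) ≤ y ∧ y < 4 := by
            intro y hy
            exact hwin y (by rw [htail]; exact List.mem_of_mem_tail hy)
          have hlast' : ∀ l : Int, (rmap (a + c) c (m' + 1)).getLast? = some l →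
              mov_ws_hit jogo c x l = false := by
            intro l hl
            apply hlast l
            rw [hsp, hsp2]
            rw [hsp2] at hl
            simpa using hl
          have hya := hin a (by rw [hsp]; simp)
          have hyac := hin (a + c) (by rw [hsp, hsp2]; simp)
          have hzw : (0 : Int) ≤ a + c ∧ a + c < 4 := by
            apply hwin (a + c)
            rw [htail, hsp2]
            simp
          have hih := ih (a + c) hin' hwin' hlast'
          rw [hsp2] at hih
          simp only [List.any_cons, List.map_cons] at hih
          rw [hsp, hsp2]
          simp only [List.any_cons, List.map_cons, adjHit]
          rw [hit_of_pair jogo c x a hya hyac hx hzw, ← hih]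

theorem dropLast_any_hit_rmap (jogo : List (List Int)) (x : Int)
    (hx : ∀ row ∈ jogo, -(row.length : Int) ≤ x ∧ x < (row.length : Int)) :
    ∀ (n : Nat) (a : Int),
      (∀ y ∈ rmap a 1 n, -(jogo.length : Int) ≤ y ∧ y < (jogo.length : Int)) →
      (∀ y ∈ (rmap a 1 n).tail, (0 : Int) ≤ y ∧ y < 4) →
      ((rmap a 1 n).dropLast).any (fun y => mov_ws_hit jogo 1 x y)
        = adjHit ((rmap a 1 n).map (readg jogo x)) := by
  intro n
  induction n with
  | zero => intro a _ _; rfl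
  | succ m ih =>
      intro a hin hwin
      cases m with
      | zero => rw [rmap_one]; simp [adjHit]
      | succ m' =>
          have hsp : rmap a 1 (m' + 1 + 1) = a :: rmap (a + 1) 1 (m' + 1) := rmap_succ a 1 (m' + 1)
          have hsp2 : rmap (a + 1) 1 (m' + 1) = (a + 1) :: rmap (a + 1 + 1) 1 m' := rmap_succ (a + 1) 1 m'
          have htail : (rmap a 1 (m' + 1 + 1)).tail = rmap (a + 1) 1 (m' + 1) := rmap_tail a 1 (m' + 1)
          have hin' : ∀ y ∈ rmap (a + 1) 1 (m' + 1), -(jogo.length : Int) ≤ y ∧ y < (jogo.length : Int) := by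
            intro y hy
            exact hin y (by rw [hsp]; exact List.mem_cons_of_mem _ hy)
          have hwin' : ∀ y ∈ (rmap (a + 1) 1 (m' + 1)).tail, (0 : Int) ≤ y ∧ y < 4 := by
            intro y hy
            exact hwin y (by rw [htail]; exact List.mem_of_mem_tail hy)
          have hya := hin a (by rw [hsp]; simp)
          have hyac := hin (a + 1) (by rw [hsp, hsp2]; simp)
          have hzw : (0 : Int) ≤ a + 1 ∧ a + 1 < 4 := by
            apply hwin (a + 1)
            rw [htail, hsp2]
            simp
          have hih := ih (a + 1) hin' hwin'
          rw [hsp]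
          rw [show (a :: rmap (a + 1) 1 (m' + 1)).dropLast = a :: (rmap (a + 1) 1 (m' + 1)).dropLast by
            rw [hsp2]; exact List.dropLast_cons₂]
          simp only [List.any_cons, List.map_cons]
          rw [hit_of_pair jogo 1 x a hya hyac hx hzw, hih, hsp2]
          simp only [List.map_cons]
          simp [adjHit]

-- ---- the per-column equality

theorem col_eq (a b c x : Int) (jogo : List (List Int))
    (hc0 : c ≠ 0)
    (hbig : preN a b c = 0 ∨
      (-(jogo.length : Int) ≤ preLo a b c ∧ preHi a b c < (jogo.length : Int) ∧
       (∀ row ∈ jogo, -(row.length : Int) ≤ preLo a b c ∧ preHi a b c < (row.length : Int)) ∧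
       (preN a b c = 1 ∨ (0 ≤ min (a + c) (preLast a b c) ∧ max (a + c) (preLast a b c) < 4)) ∧
       (c = 1 ∨ (¬(-1 < preLast a b c + c ∧ preLast a b c + c < 4) ∧
                 -(jogo.length : Int) ≤ preLast a b c + c ∧ preLast a b c + c < (jogo.length : Int)))))
    (hx : x ∈ PySem.List.pyRange a b c) :
    (PySem.List.pyRange a (if c = 1 then b + (-1) else b) c).any (fun y => mov_ws_hit jogo c x y)
      = bChanged (PySem.List.pyRange a b c) jogo x := by
  have hrep : PySem.List.pyRange a b c = rmap a c (preN a b c) := pyRange_eq_rmap a b c hc0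
  cases hn : preN a b c with
  | zero => rw [hrep, hn] at hx; simp [rmap] at hx
  | succ m =>
  rcases hbig with hn0 | ⟨hlo, hhi, hrows, htail, hextra⟩
  · rw [hn] at hn0; exact absurd hn0 (by omega)
  simp only [preLo, preHi] at hlo hhi hrows
  -- bounds for x (preLo/preHi are definitionally min/max of a and preLast)
  have hxb : min a (preLast a b c) ≤ x ∧ x ≤ max a (preLast a b c) :=
    rmap_mem_bounds a c (preN a b c) x (by rw [← hrep]; exact hx)
  have hxrow : ∀ row ∈ jogo, -(row.length : Int) ≤ x ∧ x < (row.length : Int) := by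
    intro row hr
    have h := hrows row hr
    exact ⟨le_trans h.1 hxb.1, lt_of_le_of_lt hxb.2 h.2⟩
  have hin : ∀ y ∈ rmap a c (preN a b c), -(jogo.length : Int) ≤ y ∧ y < (jogo.length : Int) := by
    intro y hy
    have hb : min a (preLast a b c) ≤ y ∧ y ≤ max a (preLast a b c) :=
      rmap_mem_bounds a c (preN a b c) y hy
    exact ⟨le_trans hlo hb.1, lt_of_le_of_lt hb.2 hhi⟩
  have hlastval : preLast a b c = a + c * (m : Int) := by
    unfold preLast
    rw [hn]
    push_cast
    ring
  have hwin : ∀ y ∈ (rmap a c (preN a b c)).tail, (0 : Int) ≤ y ∧ y < 4 := by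
    rw [hn, rmap_tail]
    intro y hy
    cases m with
    | zero => simp [rmap] at hy
    | succ m' =>
        rcases htail with h1 | h2
        · rw [hn] at h1; exact absurd h1 (by omega)
        · have hb := rmap_mem_bounds (a + c) c (m' + 1) y hy
          have heq : (a + c) + c * (((m' + 1 : Nat) : Int) - 1) = preLast a b c := by
            rw [hlastval]
            push_cast
            ring
          rw [heq] at hb
          exact ⟨le_trans h2.1 hb.1, lt_of_le_of_lt hb.2 h2.2⟩
  rw [bChanged_eq_adjHit]
  by_cases hc1 : c = 1
  · subst hc1
    rw [if_pos rfl, show b + (-1) = b - 1 by ring, pyRange_one_dropLast, hrep]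
    exact dropLast_any_hit_rmap jogo x hxrow (preN a b 1) a hin hwin
  · rw [if_neg hc1, hrep]
    apply any_hit_rmap jogo c x hxrow (preN a b c) a hin hwin
    intro l hl
    rw [hn, rmap_getLast?] at hl
    have hlv : l = preLast a b c := by
      rw [hlastval]
      exact (Option.some.injEq _ _).mp hl |>.symm ▸ rfl
    rcases hextra with h | h
    · exact absurd h hc1
    · apply hit_false_of_guard jogo c x l
      rw [hlv]
      exact h.1

-- ===== VERDICT (by name: the statement is the Claim_ definition above) =====
theorem mov_ws_spec : Claim_equal_mov_ws := by
  intro a b c p w jogo movetrue _ hpre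
  obtain ⟨hc0, hbig⟩ := hpre
  unfold Spec_mov_ws mov_ws mov_ws_alt
  rw [mov_ws_foldX_snd, mov_ws_alt_fold_snd]
  congr 1
  rw [Bool.eq_iff_iff, List.any_eq_true, List.any_eq_true]
  constructor
  · rintro ⟨x, hx, hf⟩
    exact ⟨x, hx, by rw [← col_eq a b c x jogo hc0 hbig hx]; exact hf⟩
  · rintro ⟨x, hx, hf⟩
    exact ⟨x, hx, by rw [col_eq a b c x jogo hc0 hbig hx]; exact hf⟩
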